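-- pv_equiv track=rewrite | github.com/DengYijunX/tooltesting | app/agents/problem_agent.py | _collapse_duplicate_halves
-- ===== SOURCE A (Python) =====
-- from typing import Dict, Any, List
--
-- def _collapse_duplicate_halves(lines: List[str]) -> List[str]:
--     collapsed = list(lines)
--     while len(collapsed) >= 2 and len(collapsed) % 2 == 0:
--         half = len(collapsed) // 2
--         if collapsed[:half] == collapsed[half:]:
--             collapsed = collapsed[:half]
--             continue
--         break
--     return collapsed
-- ===== SOURCE B (Python) =====
-- from typing import List
--
-- def _collapse_duplicate_halves(lines: List[str]) -> List[str]:
--     # Different algorithm: instead of repeatedly halving, find the largest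
--     # power-of-two tiling of the whole list directly. The result of the
--     # halving chain is the shortest prefix B such that lines == B * 2**t,
--     # so scan t downward from the largest possible and return the first hit.
--     n = len(lines)
--     for t in range(n.bit_length() - 1, 0, -1):
--         block = lines[:n >> t]
--         if block * (1 << t) == lines:
--             return block
--     return list(lines)
-- ===== Notes on version B (the rewrite author's own statement) =====
-- stated objective: alternative
-- what changed: B replaces A's repeated-halving while loop by a direct search for the largest power-of-two tiling: it scans t from n.bit_length()-1 down to 1 and returns the first prefix block with block * 2**t == lines, falling back to a copy of lines.
import Mathlib
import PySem

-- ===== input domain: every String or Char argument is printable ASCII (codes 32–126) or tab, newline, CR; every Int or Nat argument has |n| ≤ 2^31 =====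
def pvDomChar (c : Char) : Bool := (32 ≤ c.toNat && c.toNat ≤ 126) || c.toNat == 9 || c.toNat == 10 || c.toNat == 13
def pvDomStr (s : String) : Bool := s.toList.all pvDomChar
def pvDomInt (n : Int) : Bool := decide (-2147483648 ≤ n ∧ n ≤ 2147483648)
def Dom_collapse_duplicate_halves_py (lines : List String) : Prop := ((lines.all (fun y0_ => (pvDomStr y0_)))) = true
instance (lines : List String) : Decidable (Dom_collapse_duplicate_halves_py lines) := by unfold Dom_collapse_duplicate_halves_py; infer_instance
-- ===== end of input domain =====

-- B replaces A's repeated-halving while loop by a direct downward search for the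
-- largest power-of-two tiling of the whole list (alternative algorithm, same cost class).

-- ===== PORT A =====
-- A's while loop: the shrinking list 'collapsed' is the recursion state.
def pvLoopA (c : List String) : List String :=
  if 2 ≤ c.length ∧ c.length % 2 = 0 then
    if PySem.List.slice c none (some ((c.length / 2 : Nat) : Int))
        = PySem.List.slice c (some ((c.length / 2 : Nat) : Int)) none then
      pvLoopA (PySem.List.slice c none (some ((c.length / 2 : Nat) : Int)))
    else c
  else c
termination_by c.length
decreasing_by
  simp only [PySem.List.slice_to_natCast, List.length_take]
  omega

def collapse_duplicate_halves_py (lines : List String) : List String :=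
  pvLoopA lines

-- ===== PORT B =====
-- Python list repetition 'xs * m' (m ≥ 0): exact.
def pvRepeat (xs : List String) (m : Nat) : List String := (List.replicate m xs).flatten

-- B's for-loop 'for t in range(start, 0, -1)' with early return: t+1 is the current
-- candidate; falling through to t = 0 is the loop exhausting, returning list(lines).
def pvSearchB (lines : List String) (n : Nat) : Nat → List String
  | 0 => lines
  | t + 1 =>
      let block := PySem.List.slice lines none (some ((n >>> (t + 1) : Nat) : Int))
      if pvRepeat block (1 <<< (t + 1)) = lines
      then block
      else pvSearchB lines n t

def collapse_duplicate_halves_py_alt (lines : List String) : List String :=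
  pvSearchB lines lines.length ((PySem.Int.bitLength (lines.length : Int)) - 1)

-- ===== PRECONDITION & SPEC =====
def Spec_collapse_duplicate_halves_py (lines : List String) (out : List String) : Prop := out = collapse_duplicate_halves_py_alt lines
instance (lines : List String) (out : List String) : Decidable (Spec_collapse_duplicate_halves_py lines out) := by unfold Spec_collapse_duplicate_halves_py; infer_instance

-- ===== CLAIM =====
def Claim_equal_collapse_duplicate_halves_py : Prop := ∀ (lines : List String), Dom_collapse_duplicate_halves_py lines → Spec_collapse_duplicate_halves_py lines (collapse_duplicate_halves_py lines)

-- ===== LEMMAS AND PROOFS =====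

lemma pvRepeat_double (xs : List String) (m : Nat) :
    pvRepeat xs (2 * m) = pvRepeat xs m ++ pvRepeat xs m := by
  unfold pvRepeat
  rw [two_mul, List.replicate_add, List.flatten_append]

lemma pvRepeat_two (xs : List String) : pvRepeat xs 2 = xs ++ xs := by
  simp [pvRepeat]

lemma shiftL_double (t : Nat) : (1 : Nat) <<< (t + 1) = 2 * (1 <<< t) := by
  simp [Nat.shiftLeft_eq, pow_succ]; ring

-- the tiling condition tested by pvSearchB at level t
def pvTile (lines : List String) (t : Nat) : Prop :=
  pvRepeat (lines.take (lines.length >>> t)) (1 <<< t) = lines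

lemma searchB_cond_pos {lines : List String} {t : Nat} (h : pvTile lines (t + 1)) :
    pvSearchB lines lines.length (t + 1) = lines.take (lines.length >>> (t + 1)) := by
  rw [pvSearchB]
  simp only [PySem.List.slice_to_natCast]
  unfold pvTile at h
  rw [if_pos h]

lemma searchB_cond_neg {lines : List String} {t : Nat} (h : ¬ pvTile lines (t + 1)) :
    pvSearchB lines lines.length (t + 1) = pvSearchB lines lines.length t := by
  rw [pvSearchB]
  simp only [PySem.List.slice_to_natCast]
  unfold pvTile at h
  rw [if_neg h]

lemma tile_split {lines : List String} {t : Nat} (h : pvTile lines (t + 1)) :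
    lines = lines.take (lines.length / 2) ++ lines.take (lines.length / 2)
      ∧ lines.length % 2 = 0 := by
  unfold pvTile at h
  rw [shiftL_double, pvRepeat_double] at h
  set X := pvRepeat (lines.take (lines.length >>> (t + 1))) (1 <<< t) with hX
  have hlen : lines.length = X.length + X.length := by
    rw [← h]; simp
  have hx : X.length = lines.length / 2 := by omega
  have htake : lines.take (lines.length / 2) = X := by
    rw [← hx]
    conv_lhs => rw [← h]
    exact List.take_left
  constructor
  · rw [htake]; exact h.symm
  · omega

lemma halves_of_split {lines : List String}
    (h : lines = lines.take (lines.length / 2) ++ lines.take (lines.length / 2)) :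
    lines.take (lines.length / 2) = lines.drop (lines.length / 2) := by
  set T := lines.take (lines.length / 2) with hT
  have hlen : T.length = lines.length / 2 := by
    rw [hT, List.length_take]; omega
  calc T = (T ++ T).drop T.length := by rw [List.drop_left]
    _ = lines.drop (lines.length / 2) := by rw [← h, hlen]

lemma search_fail (lines : List String)
    (hfail : ¬(2 ≤ lines.length ∧ lines.length % 2 = 0
        ∧ lines.take (lines.length / 2) = lines.drop (lines.length / 2))) :
    ∀ s, pvSearchB lines lines.length s = lines := by
  intro s
  induction s with
  | zero => rfl
  | succ t ih =>
    by_cases hc : pvTile lines (t + 1)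
    · obtain ⟨hsp, hev⟩ := tile_split hc
      have heq := halves_of_split hsp
      have hn : lines.length < 2 := by
        by_contra hge
        exact hfail ⟨by omega, hev, heq⟩
      have h0 : lines = [] := List.eq_nil_of_length_eq_zero (by omega)
      subst h0
      rw [searchB_cond_pos hc]
      exact List.take_nil
    · rw [searchB_cond_neg hc]; exact ih

lemma search_step (lines : List String) (h2 : 2 ≤ lines.length)
    (heq : lines.take (lines.length / 2) = lines.drop (lines.length / 2)) :
    ∀ s, pvSearchB lines lines.length (s + 1)
      = pvSearchB (lines.take (lines.length / 2)) (lines.take (lines.length / 2)).length s := by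
  have hlen : (lines.take (lines.length / 2)).length = lines.length / 2 := by
    rw [List.length_take]; omega
  have hsplit : lines = lines.take (lines.length / 2) ++ lines.take (lines.length / 2) := by
    conv_lhs => rw [← List.take_append_drop (lines.length / 2) lines]
    rw [← heq]
  set n := lines.length with hn
  set h := lines.take (n / 2) with hh
  have hblock : ∀ s : Nat, h.take (h.length >>> (s + 1)) = lines.take (n >>> (s + 2)) := by
    intro s
    have hm : n >>> (s + 2) = h.length >>> (s + 1) := by
      rw [hlen]
      simp only [Nat.shiftRight_eq_div_pow]
      rw [Nat.div_div_eq_div_mul]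
      congr 1
      ring
    have hle : h.length >>> (s + 1) ≤ n / 2 := by
      rw [hlen, Nat.shiftRight_eq_div_pow]
      exact Nat.div_le_self _ _
    rw [hm, hh, List.take_take]
    congr 1
    exact Nat.min_eq_left hle
  have hlen1 : lines.length >>> 1 = n / 2 := by
    rw [Nat.shiftRight_eq_div_pow, pow_one]
  intro s
  induction s with
  | zero =>
    have hc : pvTile lines (0 + 1) := by
      unfold pvTile
      rw [show (0 : Nat) + 1 = 1 from rfl, hlen1, ← hh,
        show (1 : Nat) <<< 1 = 2 from rfl, pvRepeat_two]
      exact hsplit.symm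
    rw [searchB_cond_pos hc, show (0 : Nat) + 1 = 1 from rfl, hlen1, ← hh]
    rfl
  | succ t ih =>
    have hB : h.take (h.length >>> (t + 1)) = lines.take (n >>> (t + 2)) := hblock t
    have hiff : pvTile lines (t + 1 + 1) ↔ pvTile h (t + 1) := by
      unfold pvTile
      rw [show t + 1 + 1 = t + 2 from rfl, ← hn, hB]
      constructor
      · intro h1
        rw [shiftL_double, pvRepeat_double] at h1
        set Y := pvRepeat (lines.take (n >>> (t + 2))) (1 <<< (t + 1)) with hY
        have hYlen : Y.length = n / 2 := by
          have : n = Y.length + Y.length := by rw [hn]; rw [← h1]; simp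
          omega
        have hhY : h = Y := by
          rw [hh, ← hYlen]
          conv_lhs => rw [← h1]
          exact List.take_left
        rw [hhY]
      · intro h1
        rw [shiftL_double, pvRepeat_double, h1]
        exact hsplit.symm
    by_cases hc : pvTile lines (t + 1 + 1)
    · rw [searchB_cond_pos hc, searchB_cond_pos (hiff.mp hc), hB]
    · rw [searchB_cond_neg hc, searchB_cond_neg (fun hx => hc (hiff.mpr hx)), ih]

lemma bl_step (n : Nat) (h2 : 2 ≤ n) :
    PySem.Int.bitLength (n : Int) - 1 = (PySem.Int.bitLength ((n / 2 : Nat) : Int) - 1) + 1 := by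
  have h1 := PySem.Int.bitLength_natCast (m := n) (by omega)
  have hpos := PySem.Int.bitLength_natCast (m := n / 2) (by omega)
  omega

lemma loopA_eq_search (n : Nat) : ∀ lines : List String, lines.length = n →
    pvLoopA lines = pvSearchB lines lines.length (PySem.Int.bitLength ((lines.length : Nat) : Int) - 1) := by
  induction n using Nat.strong_induction_on with
  | _ n ih =>
    intro lines hn
    subst hn
    rw [pvLoopA]
    simp only [PySem.List.slice_to_natCast, PySem.List.slice_from_natCast]
    by_cases hc : 2 ≤ lines.length ∧ lines.length % 2 = 0
    · rw [if_pos hc]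
      by_cases heq : lines.take (lines.length / 2) = lines.drop (lines.length / 2)
      · rw [if_pos heq]
        have hlen : (lines.take (lines.length / 2)).length = lines.length / 2 := by
          rw [List.length_take]; omega
        rw [bl_step lines.length hc.1, search_step lines hc.1 heq]
        have hrec := ih (lines.length / 2) (by omega) (lines.take (lines.length / 2)) hlen
        rw [hrec, hlen]
      · rw [if_neg heq]
        exact (search_fail lines (fun h => heq h.2.2) _).symm
    · rw [if_neg hc]
      exact (search_fail lines (fun h => hc ⟨h.1, h.2.1⟩) _).symm

-- ===== VERDICT =====
theorem collapse_duplicate_halves_py_spec : Claim_equal_collapse_duplicate_halves_py := by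
  intro lines _
  unfold Spec_collapse_duplicate_halves_py collapse_duplicate_halves_py collapse_duplicate_halves_py_alt
  exact loopA_eq_search lines.length lines rfl
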